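-- pv_equiv track=rewrite | github.com/Hidalgo7/robotino_RL | ros/src/pruebas/src/mover_robot.py | array_max_index
-- ===== SOURCE A (Python) =====
-- def array_max_index(array):
--     index_max = None
--     max_val = float('-inf')
--
--     for i, subarray in enumerate(array):
--         max_subarray = max(subarray)
--         if max_subarray > max_val:
--             max_val = max_subarray
--             index_max = i
--
--     return index_max
-- ===== SOURCE B (Python) =====
-- def array_max_index(array):
--     if not array:
--         return None
--     order = sorted(range(len(array)), key=lambda i: (-max(array[i]), i))
--     return order[0]
-- ===== Notes on version B (the rewrite author's own statement) =====
-- stated objective: alternative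
-- what changed: Replaces the fused running-max/index tracking loop with a sort: rank the indices by the composite key (-max(subarray), index) and return the first of the sorted order, which is the smallest index attaining the overall maximum.
import Mathlib
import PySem

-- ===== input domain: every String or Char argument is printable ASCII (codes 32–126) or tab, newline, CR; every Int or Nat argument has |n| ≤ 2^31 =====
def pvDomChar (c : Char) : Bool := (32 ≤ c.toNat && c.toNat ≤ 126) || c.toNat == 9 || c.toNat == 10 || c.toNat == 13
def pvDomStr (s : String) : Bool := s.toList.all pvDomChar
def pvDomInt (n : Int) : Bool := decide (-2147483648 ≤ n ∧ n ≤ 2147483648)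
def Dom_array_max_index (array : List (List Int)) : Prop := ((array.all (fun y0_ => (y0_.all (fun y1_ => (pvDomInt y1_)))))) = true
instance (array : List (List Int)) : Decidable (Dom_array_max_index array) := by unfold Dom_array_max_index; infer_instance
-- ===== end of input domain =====

-- B replaces A's fused running-max/index loop by a sort of the indices under the key (-max(subarray), index) and taking the sorted order's first element (alternative algorithm, not faster).

-- ===== PORT A =====
-- A's loop state: (index_max, max_val); max_val = none models float('-inf').
def pvStepA (s : Option Int × Option Int) (p : Int × List Int) : Option Int × Option Int :=
  match PySem.List.max? p.2 (fun x => x) with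
  | none => s            -- Python raises ValueError on an empty subarray; excluded by Pre_
  | some m =>
    match s.2 with
    | none => (some p.1, some m)          -- anything > -inf
    | some v => if m > v then (some p.1, some m) else s

def array_max_index (array : List (List Int)) : Option Int :=
  ((PySem.List.enumerate array 0).foldl pvStepA (none, none)).1

-- ===== PORT B =====
-- key of index i: (-max(array[i]), i); the getD 0 totalizers are unreachable under Pre_ (no empty subarray, indices in range)
def pvKey1 (array : List (List Int)) (i : Int) : Int :=
  -((PySem.List.max? (PySem.List.pyGetD array i []) (fun x => x)).getD 0)

def array_max_index_alt (array : List (List Int)) : Option Int :=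
  if array = [] then none
  else
    let order := PySem.List.sorted2 (PySem.List.pyRange 0 (PySem.List.len array) 1)
      (pvKey1 array) (fun i => i)
    PySem.List.pyGet? order 0

-- ===== PRECONDITION & SPEC =====
-- Pre_ excludes inputs with an empty subarray, on which A raises ValueError via max().
def Pre_array_max_index (array : List (List Int)) : Prop := ∀ sub ∈ array, sub ≠ []
instance (array : List (List Int)) : Decidable (Pre_array_max_index array) := by unfold Pre_array_max_index; infer_instance
def pvWitness_array_max_index : List (List Int) := [[1, 5], [7], [7, 2]]

def Spec_array_max_index (array : List (List Int)) (out : Option Int) : Prop := out = array_max_index_alt array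
instance (array : List (List Int)) (out : Option Int) : Decidable (Spec_array_max_index array out) := by unfold Spec_array_max_index; infer_instance

-- ===== CLAIM (what is proved, stated in full; the proofs are below) =====
def Claim_equal_array_max_index : Prop := ∀ (array : List (List Int)), Dom_array_max_index array → Pre_array_max_index array → Spec_array_max_index array (array_max_index array)

-- ===== LEMMAS AND PROOFS =====

-- the list of per-subarray maxima (proof-side abbreviation, not used by the ports)
def pvMs (array : List (List Int)) : List Int :=
  array.map (fun sub => (PySem.List.max? sub (fun x => x)).getD 0)

-- pvStepA on a nonempty subarray depends only on its max value
def pvStepY (s : Option Int × Option Int) (p : Int × Int) : Option Int × Option Int :=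
  match s.2 with
  | none => (some p.1, some p.2)
  | some v => if p.2 > v then (some p.1, some p.2) else s

-- the common running "first strict improvement" fold both sides reduce to
def pvRunStep (s : Int × Int) (p : Int × Int) : Int × Int :=
  if p.2 > s.2 then p else s

-- under Pre_, A's fold over subarrays equals the pvStepY fold over the list of subarray maxima
theorem pv_fold_map (xs : List (List Int)) : ∀ (k : Int) (s : Option Int × Option Int),
    (∀ sub ∈ xs, sub ≠ []) →
    (PySem.List.enumerate xs k).foldl pvStepA s =
      (PySem.List.enumerate (pvMs xs) k).foldl pvStepY s := by
  induction xs with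
  | nil => intro k s _; simp [PySem.List.enumerate_nil, pvMs]
  | cons sub t ih =>
    intro k s hpre
    obtain ⟨c, cs, rfl⟩ := List.exists_cons_of_ne_nil (hpre sub List.mem_cons_self)
    rw [pvMs, List.map_cons, PySem.List.enumerate_cons, PySem.List.enumerate_cons,
      List.foldl_cons, List.foldl_cons]
    have hmax : PySem.List.max? (c :: cs) (fun x => x) = some (cs.foldl max c) :=
      PySem.List.max?_id_cons c cs
    have hstep : pvStepA s (k, c :: cs) =
        pvStepY s (k, (PySem.List.max? (c :: cs) (fun x => x)).getD 0) := by
      simp only [pvStepA, pvStepY, hmax, Option.getD_some]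
    rw [hstep]
    exact ih (k + 1) _ (fun u hu => hpre u (List.mem_cons_of_mem _ hu))

-- once both components are some, the pvStepY fold is the pure pvRunStep fold
theorem pvA_run (t : List Int) : ∀ (k j v : Int),
    (PySem.List.enumerate t k).foldl pvStepY (some j, some v) =
      (some ((PySem.List.enumerate t k).foldl pvRunStep (j, v)).1,
       some ((PySem.List.enumerate t k).foldl pvRunStep (j, v)).2) := by
  induction t with
  | nil => intro k j v; simp [PySem.List.enumerate_nil]
  | cons y s ih =>
    intro k j v
    rw [PySem.List.enumerate_cons, List.foldl_cons, List.foldl_cons]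
    by_cases h : y > v
    · have h1 : pvStepY (some j, some v) (k, y) = (some k, some y) := by
        simp [pvStepY, h]
      have h2 : pvRunStep (j, v) (k, y) = (k, y) := by simp [pvRunStep, h]
      rw [h1, h2, ih]
    · have h1 : pvStepY (some j, some v) (k, y) = (some j, some v) := by
        simp [pvStepY, h]
      have h2 : pvRunStep (j, v) (k, y) = (j, v) := by simp [pvRunStep, h]
      rw [h1, h2, ih]

-- the head of a fold of insertBy into a nonempty accumulator is a running "keep the earlier unless before" fold
theorem pv_head_insertBy (bf : Int → Int → Bool) (xs : List Int) : ∀ (a : Int) (rest : List Int),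
    (xs.foldl (fun acc x => PySem.List.insertBy bf x acc) (a :: rest)).head? =
      some (xs.foldl (fun m x => if bf x m then x else m) a) := by
  induction xs with
  | nil => intro a rest; simp
  | cons x t ih =>
    intro a rest
    rw [List.foldl_cons, List.foldl_cons]
    by_cases h : bf x a
    · have : PySem.List.insertBy bf x (a :: rest) = x :: a :: rest := by
        simp [PySem.List.insertBy, h]
      rw [this, ih, if_pos h]
    · have : PySem.List.insertBy bf x (a :: rest) = a :: PySem.List.insertBy bf x rest := by
        simp [PySem.List.insertBy, h]
      rw [this, ih, if_neg h]

-- B's key looked up at a natural index is the corresponding per-subarray maximum (with default 0)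
theorem pv_key_nat (array : List (List Int)) (m : Nat) :
    pvKey1 array (m : Int) = -((pvMs array).getD m 0) := by
  rw [pvKey1, PySem.List.pyGetD_natCast, pvMs]
  by_cases h : m < array.length
  · rw [List.getD_eq_getElem _ _ h, List.getD_eq_getElem _ _ (by simpa using h)]
    simp
  · rw [List.getD_eq_default _ _ (by omega), List.getD_eq_default _ _ (by simpa using (by omega : ¬ m < array.length))]
    simp [PySem.List.max?]

-- the running-min-under-before fold over the remaining index range equals the pvRunStep fold over the remaining maxima
theorem pvB_run (array : List (List Int)) :
    ∀ (d k j : Nat), k + d = array.length → j ≤ k → j < array.length →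
    (PySem.List.pyRange (k : Int) ((array.length : Nat) : Int) 1).foldl
        (fun m i => if (decide (pvKey1 array i < pvKey1 array m) ||
            (!decide (pvKey1 array m < pvKey1 array i) && decide (i < m))) then i else m) (j : Int) =
      ((PySem.List.enumerate ((pvMs array).drop k) (k : Int)).foldl pvRunStep
        ((j : Int), (pvMs array).getD j 0)).1 := by
  intro d
  induction d with
  | zero =>
    intro k j hk hjk hj
    have hk' : (k : Int) = ((array.length : Nat) : Int) := by omega
    have hr : PySem.List.pyRange (k : Int) ((array.length : Nat) : Int) 1 = [] := by
      rw [hk']; simp [pysem]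
    have hd : (pvMs array).drop k = [] := by
      apply List.drop_eq_nil_of_le; simp [pvMs]; omega
    rw [hr, hd]
    simp [PySem.List.enumerate_nil]
  | succ d ih =>
    intro k j hk hjk hj
    have hlen : ((pvMs array).length) = array.length := by simp [pvMs]
    have hkl : k < array.length := by omega
    have hr : PySem.List.pyRange (k : Int) ((array.length : Nat) : Int) 1 =
        (k : Int) :: PySem.List.pyRange ((k : Int) + 1) ((array.length : Nat) : Int) 1 :=
      PySem.List.pyRange_one_cons (by exact_mod_cast hkl)
    have hd : (pvMs array).drop k = (pvMs array)[k] :: (pvMs array).drop (k + 1) := by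
      rw [List.getElem_cons_drop (by omega)]
    rw [hr, hd, PySem.List.enumerate_cons, List.foldl_cons, List.foldl_cons]
    have hkj : ¬ ((k : Int) < (j : Int)) := by exact_mod_cast Nat.not_lt.mpr hjk
    have hgetk : (pvMs array).getD k 0 = (pvMs array)[k] := List.getD_eq_getElem _ _ (by omega)
    have hgetj : (pvMs array).getD j 0 = (pvMs array)[j]'(by omega) := List.getD_eq_getElem _ _ (by omega)
    have hbf : (decide (pvKey1 array (k : Int) < pvKey1 array (j : Int)) ||
        (!decide (pvKey1 array (j : Int) < pvKey1 array (k : Int)) && decide ((k : Int) < (j : Int))))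
        = decide ((pvMs array)[k] > (pvMs array).getD j 0) := by
      rw [pv_key_nat, pv_key_nat, hgetk]
      simp [hkj]
    have hstep : pvRunStep ((j : Int), (pvMs array).getD j 0) ((k : Int), (pvMs array)[k]) =
        if (pvMs array)[k] > (pvMs array).getD j 0 then ((k : Int), (pvMs array)[k])
        else ((j : Int), (pvMs array).getD j 0) := rfl
    rw [hbf, hstep]
    by_cases h : (pvMs array)[k] > (pvMs array).getD j 0
    · rw [if_pos (by simpa using h), if_pos h]
      have hcast : (k : Int) + 1 = ((k + 1 : Nat) : Int) := by push_cast; ring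
      rw [hcast, ih (k + 1) k (by omega) (by omega) hkl, hgetk]
    · rw [if_neg (by simpa using h), if_neg h]
      have hcast : (k : Int) + 1 = ((k + 1 : Nat) : Int) := by push_cast; ring
      rw [hcast, ih (k + 1) j (by omega) (by omega) hj]

-- ===== VERDICT (by name: the statement is the Claim_ definition above) =====
theorem array_max_index_spec : Claim_equal_array_max_index := by
  intro array _ hpre
  unfold Spec_array_max_index
  cases harr : array with
  | nil => rfl
  | cons sub t =>
    -- A side
    rw [array_max_index, pv_fold_map _ 0 _ (harr ▸ hpre)]
    have hms : pvMs (sub :: t) = ((PySem.List.max? sub (fun x => x)).getD 0) :: pvMs t := by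
      simp [pvMs]
    rw [hms, PySem.List.enumerate_cons, List.foldl_cons]
    have hfirst : pvStepY ((none : Option Int), (none : Option Int))
        (0, (PySem.List.max? sub (fun x => x)).getD 0) =
        (some 0, some ((PySem.List.max? sub (fun x => x)).getD 0)) := rfl
    rw [hfirst, pvA_run]
    -- B side
    rw [array_max_index_alt, if_neg (by simp)]
    have hlen : PySem.List.len (sub :: t) = (((sub :: t).length : Nat) : Int) := by
      simp [pysem]
    have hpos : (0 : Int) < (((sub :: t).length : Nat) : Int) := by
      have : 0 < (sub :: t).length := by simp
      exact_mod_cast this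
    have hsorted : PySem.List.sorted2 (PySem.List.pyRange 0 (PySem.List.len (sub :: t)) 1)
        (pvKey1 (sub :: t)) (fun i => i) =
      (PySem.List.pyRange 0 (PySem.List.len (sub :: t)) 1).foldl
        (fun acc x => PySem.List.insertBy
          (fun a b => decide (pvKey1 (sub :: t) a < pvKey1 (sub :: t) b) ||
            (!decide (pvKey1 (sub :: t) b < pvKey1 (sub :: t) a) && decide (a < b))) x acc) [] := rfl
    rw [hsorted, hlen, PySem.List.pyRange_one_cons hpos, List.foldl_cons]
    have hins0 : PySem.List.insertBy
          (fun a b => decide (pvKey1 (sub :: t) a < pvKey1 (sub :: t) b) ||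
            (!decide (pvKey1 (sub :: t) b < pvKey1 (sub :: t) a) && decide (a < b)))
          (0 : Int) ([] : List Int) = [(0 : Int)] := rfl
    rw [hins0]
    have hhead := pv_head_insertBy
      (fun a b => decide (pvKey1 (sub :: t) a < pvKey1 (sub :: t) b) ||
        (!decide (pvKey1 (sub :: t) b < pvKey1 (sub :: t) a) && decide (a < b)))
      (PySem.List.pyRange ((0 : Int) + 1) (((sub :: t).length : Nat) : Int) 1) 0 []
    rw [PySem.List.pyGet?_zero, ← List.head?_eq_getElem?, hhead]
    have h01 : ((0 : Int) + 1) = ((1 : Nat) : Int) := by norm_num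
    have h0 : (0 : Int) = ((0 : Nat) : Int) := by norm_num
    rw [h01, h0, pvB_run (sub :: t) ((sub :: t).length - 1) 1 0 (by simp; omega) (by omega) (by simp)]
    have hdrop : (pvMs (sub :: t)).drop 1 = pvMs t := by simp [hms]
    have hget0 : (pvMs (sub :: t)).getD 0 0 = (PySem.List.max? sub (fun x => x)).getD 0 := by
      simp [hms]
    rw [hdrop, hget0]
    norm_num
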